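-- pv_equiv track=rewrite | github.com/brianmahlstedt/fivesquared | fivesquared.py | find_new_anchor
-- ===== SOURCE A (Python) =====
-- class BoardFullError(Exception):
--     def __init__(self):
--         super().__init__('The board is full.')
--
-- def find_new_anchor(grid):
--     """Finds the most upper-left cell in the current grid.
--
--     Args:
--         grid (list of lists): current board
--
--     Returns:
--         (tuple of 2 ints): anchor indexed from 1
--
--     Raises:
--         BoardFullError if board is full
--     """
--     (x, y) = (0, 0)
--     for row, cols in enumerate(grid):
--         if 0 in cols:
--              y = cols.index(0) + 1
--              x = row + 1
--              break
--     if x == 0 and y == 0: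
--         raise BoardFullError
--     return (x, y)
-- ===== SOURCE B (Python) =====
-- class BoardFullError(Exception):
--     def __init__(self):
--         super().__init__('The board is full.')
--
-- def find_new_anchor(grid):
--     """Flatten-then-decode: find the first zero's flat index in the concatenated
--     grid, then convert it back to 1-based (row, col) by subtracting row lengths."""
--     flat = [v for row in grid for v in row]
--     try:
--         k = flat.index(0)
--     except ValueError:
--         raise BoardFullError
--     for i, row in enumerate(grid):
--         if k < len(row):
--             return (i + 1, k + 1)
--         k -= len(row)
-- ===== Notes on version B (the rewrite author's own statement) =====
-- stated objective: alternative
-- what changed: B flattens the grid into one list, takes the global index of the first zero, and decodes that flat index back into 1-based (row, col) by subtracting row lengths, instead of A's per-row membership test plus .index scan with a (0,0)-sentinel post-check.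
import Mathlib
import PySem

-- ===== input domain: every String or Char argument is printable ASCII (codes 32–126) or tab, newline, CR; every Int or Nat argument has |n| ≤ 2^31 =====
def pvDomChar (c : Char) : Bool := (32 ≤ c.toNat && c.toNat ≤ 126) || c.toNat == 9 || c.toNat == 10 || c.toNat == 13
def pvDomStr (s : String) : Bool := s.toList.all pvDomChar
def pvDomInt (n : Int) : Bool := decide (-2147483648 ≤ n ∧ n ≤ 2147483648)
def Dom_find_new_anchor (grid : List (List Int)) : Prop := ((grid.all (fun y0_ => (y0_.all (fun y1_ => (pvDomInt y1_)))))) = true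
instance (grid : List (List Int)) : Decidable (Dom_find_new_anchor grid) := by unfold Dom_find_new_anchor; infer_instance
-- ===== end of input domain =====

-- B flattens the grid, takes the first zero's global index, and decodes it back to
-- 1-based (row, col) by subtracting row lengths — replacing A's per-row membership test
-- + .index scan + (0,0)-sentinel post-check (alternative decomposition; equal on Pre_).

-- ===== PORT A =====
-- the for-loop with break: first row containing 0 sets (x, y) = (row+1, index+1)
def find_new_anchor_go (grid : List (List Int)) (row : Nat) : Int × Int :=
  match grid with
  | [] => (0, 0)
  | cols :: rest =>
    if (0 : Int) ∈ cols then
      ((row : Int) + 1, ((PySem.List.index? cols 0).getD 0 : Int) + 1)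
    else
      find_new_anchor_go rest (row + 1)

def find_new_anchor (grid : List (List Int)) : Int × Int :=
  find_new_anchor_go grid 0
  -- Python raises BoardFullError when the result is (0,0); such grids are outside Pre_.

-- ===== PORT B =====
-- the decoding loop: `for i, row in enumerate(grid): if k < len(row): return …; k -= len(row)`
def altDecode (grid : List (List Int)) (i : Nat) (k : Nat) : Int × Int :=
  match grid with
  | [] => (0, 0)   -- Python falls off the loop (returns None); unreachable for a valid flat index
  | row :: rest =>
    if k < row.length then ((i : Int) + 1, (k : Int) + 1)
    else altDecode rest (i + 1) (k - row.length)

def find_new_anchor_alt (grid : List (List Int)) : Int × Int :=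
  let flat := grid.flatMap (fun row => row)
  match PySem.List.index? flat 0 with
  | none => (0, 0)   -- Python raises BoardFullError here; such grids are outside Pre_.
  | some k => altDecode grid 0 k

-- ===== PRECONDITION & SPEC =====
-- Pre_ excludes full boards (no zero cell anywhere), on which Python A raises BoardFullError.
def Pre_find_new_anchor (grid : List (List Int)) : Prop := ∃ row ∈ grid, (0 : Int) ∈ row
instance (grid : List (List Int)) : Decidable (Pre_find_new_anchor grid) := by unfold Pre_find_new_anchor; infer_instance

def pvWitness_find_new_anchor : List (List Int) := [[1, 2], [3, 0]]

def Spec_find_new_anchor (grid : List (List Int)) (out : Int × Int) : Prop := out = find_new_anchor_alt grid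
instance (grid : List (List Int)) (out : Int × Int) : Decidable (Spec_find_new_anchor grid out) := by unfold Spec_find_new_anchor; infer_instance

-- ===== CLAIM (what is proved, stated in full; the proofs are below) =====
def Claim_equal_find_new_anchor : Prop := ∀ (grid : List (List Int)), Dom_find_new_anchor grid → Pre_find_new_anchor grid → Spec_find_new_anchor grid (find_new_anchor grid)

-- ===== LEMMAS AND PROOFS =====
-- index? over an append whose left part lacks the element: shift the right index
theorem index?_append_of_not_mem (l t : List Int) (v : Int) (h : v ∉ l) :
    PySem.List.index? (l ++ t) v = (PySem.List.index? t v).map (· + l.length) := by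
  induction l with
  | nil => simp
  | cons x xs ih =>
    have hx : x ≠ v := fun he => h (he ▸ List.mem_cons_self)
    have hxs : v ∉ xs := fun hm => h (List.mem_cons_of_mem _ hm)
    rw [List.cons_append, PySem.List.index?_cons_of_ne _ hx, ih hxs, Option.map_map]
    cases PySem.List.index? t v <;> simp <;> omega

-- the key invariant: A's loop from row i equals B's decode of the flat index, from row i
theorem go_eq (grid : List (List Int)) (i : Nat) (hp : ∃ row ∈ grid, (0 : Int) ∈ row) :
    find_new_anchor_go grid i =
      match PySem.List.index? (grid.flatMap (fun row => row)) 0 with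
      | none => (0, 0)
      | some k => altDecode grid i k := by
  induction grid generalizing i with
  | nil => simp at hp
  | cons row rest ih =>
    by_cases h : (0 : Int) ∈ row
    · have hs : (PySem.List.index? row 0).isSome := (PySem.List.index?_isSome_iff _ _).mpr h
      obtain ⟨k, hk⟩ := Option.isSome_iff_exists.mp hs
      have hk_lt : k < row.length := by
        obtain ⟨hlt, _, _⟩ := PySem.List.getElem_of_index?_eq_some hk
        exact hlt
      have hap : PySem.List.index? (row ++ rest.flatMap (fun r => r)) 0 = some k := by
        rw [PySem.List.index?_append_of_mem _ h, hk]
      simp only [find_new_anchor_go, if_pos h, List.flatMap_cons, hap, hk,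
        altDecode, if_pos hk_lt, Option.getD_some]
    · have hn : PySem.List.index? row 0 = none := (PySem.List.index?_eq_none_iff _ _).mpr h
      have hrest : ∃ r ∈ rest, (0 : Int) ∈ r := by
        obtain ⟨r, hr, hz⟩ := hp
        rcases List.mem_cons.mp hr with he | hm
        · exact absurd (he ▸ hz) h
        · exact ⟨r, hm, hz⟩
      have hap : PySem.List.index? ((row :: rest).flatMap (fun r => r)) 0 =
          (PySem.List.index? (rest.flatMap (fun r => r)) 0).map (· + row.length) := by
        rw [List.flatMap_cons]
        exact index?_append_of_not_mem _ _ _ h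
      obtain ⟨kr, hkr⟩ : ∃ kr, PySem.List.index? (rest.flatMap (fun r => r)) 0 = some kr := by
        obtain ⟨r, hm, hz⟩ := hrest
        have : (0 : Int) ∈ rest.flatMap (fun r => r) := List.mem_flatMap.mpr ⟨r, hm, hz⟩
        exact Option.isSome_iff_exists.mp ((PySem.List.index?_isSome_iff _ _).mpr this)
      have hge : ¬ kr + row.length < row.length := by omega
      simp only [find_new_anchor_go, if_neg h, hap, hkr, Option.map_some,
        altDecode, if_neg hge, Nat.add_sub_cancel]
      rw [ih (i + 1) hrest, hkr]

-- ===== VERDICT (by name: the statement is the Claim_ definition above) =====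
theorem find_new_anchor_spec : Claim_equal_find_new_anchor := by
  intro grid _ hp
  unfold Spec_find_new_anchor find_new_anchor find_new_anchor_alt
  exact go_eq grid 0 hp
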